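-- pv_equiv track=rewrite | github.com/sauravpanda/workflow-use | workflows/cli.py | _find_best_semantic_match
-- ===== SOURCE A (Python) =====
-- def _find_best_semantic_match(element_text, semantic_mapping):
-- 	"""Find the best semantic match for element text."""
-- 	if not element_text or not semantic_mapping:
-- 		return None
--
-- 	element_text_lower = element_text.lower().strip()
--
-- 	# Exact match first
-- 	for text_key in semantic_mapping.keys():
-- 		if text_key.lower() == element_text_lower:
-- 			return text_key
--
-- 	# Partial match
-- 	for text_key in semantic_mapping.keys():
-- 		if element_text_lower in text_key.lower() or text_key.lower() in element_text_lower: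
-- 			return text_key
--
-- 	# If no good match, return original text (the semantic executor will try to find it)
-- 	return element_text
-- ===== SOURCE B (Python) =====
-- def _find_best_semantic_match(element_text, semantic_mapping):
-- 	"""Find the best semantic match for element text (single pass, two accumulators)."""
-- 	if not element_text or not semantic_mapping:
-- 		return None
--
-- 	element_text_lower = element_text.lower().strip()
--
-- 	first_exact = None
-- 	first_partial = None
-- 	for text_key in semantic_mapping.keys():
-- 		tk = text_key.lower()
-- 		if tk == element_text_lower:
-- 			if first_exact is None:
-- 				first_exact = text_key
-- 		elif element_text_lower in tk or tk in element_text_lower: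
-- 			if first_partial is None:
-- 				first_partial = text_key
--
-- 	if first_exact is not None:
-- 		return first_exact
-- 	if first_partial is not None:
-- 		return first_partial
-- 	return element_text
-- ===== Notes on version B (the rewrite author's own statement) =====
-- stated objective: alternative
-- what changed: Replaces A's two sequential early-return scans over the keys (exact pass, then partial pass) by a single pass maintaining two accumulators (first exact match, first non-exact partial match) resolved after the loop.
import Mathlib
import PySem

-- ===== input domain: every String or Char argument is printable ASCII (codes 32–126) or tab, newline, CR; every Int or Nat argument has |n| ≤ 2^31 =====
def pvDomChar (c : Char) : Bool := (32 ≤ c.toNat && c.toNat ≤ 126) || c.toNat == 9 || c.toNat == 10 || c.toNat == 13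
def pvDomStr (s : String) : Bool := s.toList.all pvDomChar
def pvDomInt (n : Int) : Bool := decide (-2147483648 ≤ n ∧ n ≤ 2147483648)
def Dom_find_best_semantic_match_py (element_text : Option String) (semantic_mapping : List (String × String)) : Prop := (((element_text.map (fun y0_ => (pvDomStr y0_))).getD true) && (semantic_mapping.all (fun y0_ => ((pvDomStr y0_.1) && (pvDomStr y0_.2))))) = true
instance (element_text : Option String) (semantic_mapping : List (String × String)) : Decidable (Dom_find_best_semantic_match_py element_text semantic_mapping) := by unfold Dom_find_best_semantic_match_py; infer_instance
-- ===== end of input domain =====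

-- B replaces A's two sequential early-return scans over the keys by one pass with two
-- accumulators (first exact, first non-exact partial); alternative decomposition, same cost.

-- ===== PORT A =====
def find_best_semantic_match_py (element_text : Option String) (semantic_mapping : List (String × String)) : Option String :=
  match element_text with
  | none => none
  | some s =>
    if s = "" ∨ semantic_mapping = [] then none
    else
      let element_text_lower := PySem.Str.strip (PySem.Str.lower s)
      let keys := (PySem.Dict.ofList semantic_mapping).keys
      -- Exact match first
      match keys.find? (fun text_key => PySem.Str.lower text_key == element_text_lower) with
      | some text_key => some text_key
      | none =>
        -- Partial match
        match keys.find? (fun text_key =>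
            PySem.Str.isIn element_text_lower (PySem.Str.lower text_key) ||
            PySem.Str.isIn (PySem.Str.lower text_key) element_text_lower) with
        | some text_key => some text_key
        | none => some s

-- ===== PORT B =====
-- one step of B's single loop over the keys
def pvAltStep (element_text_lower : String) (acc : Option String × Option String) (text_key : String) :
    Option String × Option String :=
  let tk := PySem.Str.lower text_key
  if tk == element_text_lower then
    if acc.1.isNone then (some text_key, acc.2) else acc
  else if PySem.Str.isIn element_text_lower tk || PySem.Str.isIn tk element_text_lower then
    if acc.2.isNone then (acc.1, some text_key) else acc
  else acc

def find_best_semantic_match_py_alt (element_text : Option String) (semantic_mapping : List (String × String)) : Option String :=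
  match element_text with
  | none => none
  | some s =>
    if s = "" ∨ semantic_mapping = [] then none
    else
      let element_text_lower := PySem.Str.strip (PySem.Str.lower s)
      let acc := ((PySem.Dict.ofList semantic_mapping).keys).foldl
        (pvAltStep element_text_lower) (none, none)
      match acc.1 with
      | some k => some k
      | none =>
        match acc.2 with
        | some k => some k
        | none => some s

-- ===== PRECONDITION & SPEC =====
def Spec_find_best_semantic_match_py (element_text : Option String) (semantic_mapping : List (String × String)) (out : Option String) : Prop := out = find_best_semantic_match_py_alt element_text semantic_mapping
instance (element_text : Option String) (semantic_mapping : List (String × String)) (out : Option String) : Decidable (Spec_find_best_semantic_match_py element_text semantic_mapping out) := by unfold Spec_find_best_semantic_match_py; infer_instance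

-- ===== CLAIM (what is proved, stated in full; the proofs are below) =====
def Claim_equal_find_best_semantic_match_py : Prop := ∀ (element_text : Option String) (semantic_mapping : List (String × String)), Dom_find_best_semantic_match_py element_text semantic_mapping → Spec_find_best_semantic_match_py element_text semantic_mapping (find_best_semantic_match_py element_text semantic_mapping)

-- ===== LEMMAS AND PROOFS =====

-- B's single fold fills its two slots independently: the first with the first exact key,
-- the second with the first non-exact partial key.
theorem pvFold_char (elow : String) (ks : List String) (acc : Option String × Option String) :
    ks.foldl (pvAltStep elow) acc =
      (acc.1.or (ks.find? (fun k => PySem.Str.lower k == elow)),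
       acc.2.or (ks.find? (fun k =>
         !(PySem.Str.lower k == elow) &&
         (PySem.Str.isIn elow (PySem.Str.lower k) || PySem.Str.isIn (PySem.Str.lower k) elow)))) := by
  induction ks generalizing acc with
  | nil => simp
  | cons k t ih =>
    obtain ⟨a1, a2⟩ := acc
    simp only [List.foldl_cons, ih, List.find?_cons]
    by_cases he : (PySem.Str.lower k == elow) = true
    · cases a1 <;> simp [pvAltStep, he]
    · by_cases hA : PySem.Chars.isIn elow.toList (PySem.Chars.lower k.toList) = true <;>
      by_cases hB : PySem.Chars.isIn (PySem.Chars.lower k.toList) elow.toList = true <;>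
      cases a2 <;>
      simp [pvAltStep, he, hA, hB, PySem.Str.isIn]

-- If no key is exact, filtering out exact keys does not change the first partial key.
theorem pvFind_partial_congr (elow : String) (ks : List String)
    (h : ∀ k ∈ ks, ¬ (PySem.Str.lower k == elow) = true) :
    ks.find? (fun k =>
        !(PySem.Str.lower k == elow) &&
        (PySem.Str.isIn elow (PySem.Str.lower k) || PySem.Str.isIn (PySem.Str.lower k) elow)) =
    ks.find? (fun k =>
        PySem.Str.isIn elow (PySem.Str.lower k) || PySem.Str.isIn (PySem.Str.lower k) elow) := by
  induction ks with
  | nil => rfl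
  | cons k t ih =>
    have hk := h k (by simp)
    simp only [List.find?_cons, Bool.not_eq_true] at *
    rw [Bool.eq_false_iff] at hk
    simp only [hk, Bool.not_false, Bool.true_and]
    split
    · rfl
    · exact ih (fun x hx => h x (by simp [hx]))

-- ===== VERDICT (by name: the statement is the Claim_ definition above) =====
theorem find_best_semantic_match_py_spec : Claim_equal_find_best_semantic_match_py := by
  intro element_text semantic_mapping _
  unfold Spec_find_best_semantic_match_py
  cases element_text with
  | none => rfl
  | some s =>
    simp only [find_best_semantic_match_py, find_best_semantic_match_py_alt]
    split
    · rfl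
    · rw [pvFold_char]
      simp only [Option.none_or]
      cases hfe : ((PySem.Dict.ofList semantic_mapping).keys).find?
          (fun k => PySem.Str.lower k == PySem.Str.strip (PySem.Str.lower s)) with
      | some k => simp
      | none =>
        rw [pvFind_partial_congr _ _ (by
          intro k hk
          have := List.find?_eq_none.mp hfe k hk
          simpa using this)]
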